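-- pv_equiv track=rewrite | github.com/ruslanmv/ai-project-analizer | src/utils/language_detector.py | guess_stack
-- ===== SOURCE A (Python) =====
-- from typing import Any, Dict, List, Optional, Tuple
--
-- def guess_stack(file_summaries: List[Dict[str, Any]]) -> str:
--     """
--     Given a list of per-file summaries (each entry has 'rel_path', 'kind', etc.),
--     infer a high-level “project type”:
--       • If 'pyproject.toml' or 'setup.py' present → Python package
--       • If 'package.json' present → Node.js project
--       • If 'Dockerfile' present → Containerized service
--       • If 'go.mod' present → Go module
--       • If 'pom.xml' present → Java Maven project
--       • Fallback: “Mixed” or “Unknown”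
--
--     Returns
--     -------
--     str
--       Short description of the likely tech stack.
--     """
--     paths = [entry.get("rel_path", "").lower() for entry in file_summaries]
--     if any(p.endswith("setup.py") or p.endswith("pyproject.toml") for p in paths):
--         return "Python package"
--     if any(p.endswith("package.json") for p in paths):
--         return "Node.js project"
--     if any(p.endswith("dockerfile") for p in paths):
--         return "Containerized service"
--     if any(p.endswith("go.mod") for p in paths):
--         return "Go module"
--     if any(p.endswith("pom.xml") for p in paths):
--         return "Java Maven project"
--     return "Unknown or mixed‐language project"
-- ===== SOURCE B (Python) =====
-- _RESULTS = [
--     "Python package",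
--     "Node.js project",
--     "Containerized service",
--     "Go module",
--     "Java Maven project",
--     "Unknown or mixed\u2010language project",
-- ]
--
--
-- def _rank(p):
--     if p.endswith("setup.py") or p.endswith("pyproject.toml"):
--         return 0
--     if p.endswith("package.json"):
--         return 1
--     if p.endswith("dockerfile"):
--         return 2
--     if p.endswith("go.mod"):
--         return 3
--     if p.endswith("pom.xml"):
--         return 4
--     return 5
--
--
-- def guess_stack(file_summaries):
--     best = 5
--     for entry in file_summaries:
--         r = _rank(entry.get("rel_path", "").lower())
--         if r < best:
--             best = r
--     return _RESULTS[best]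
-- ===== Notes on version B (the rewrite author's own statement) =====
-- stated objective: alternative
-- what changed: Instead of five priority-ordered any()-scans over the whole path list, B classifies each entry once into a numeric priority rank, keeps a running minimum rank in a single pass, and indexes a result table with that minimum.
import Mathlib
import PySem

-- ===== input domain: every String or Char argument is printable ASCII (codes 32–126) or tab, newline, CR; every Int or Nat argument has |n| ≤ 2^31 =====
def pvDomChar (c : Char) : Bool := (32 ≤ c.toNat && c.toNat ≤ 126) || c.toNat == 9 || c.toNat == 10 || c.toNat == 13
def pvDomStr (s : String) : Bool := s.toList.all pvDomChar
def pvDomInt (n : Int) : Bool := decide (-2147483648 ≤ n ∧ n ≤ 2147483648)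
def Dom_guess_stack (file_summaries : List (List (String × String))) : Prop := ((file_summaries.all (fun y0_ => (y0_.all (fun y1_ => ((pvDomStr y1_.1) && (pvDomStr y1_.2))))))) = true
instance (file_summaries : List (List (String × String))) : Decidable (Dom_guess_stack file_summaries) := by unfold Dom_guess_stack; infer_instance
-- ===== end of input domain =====

-- B replaces A's five priority-ordered any()-scans by classifying each entry once into a numeric
-- priority rank, folding a running minimum, and indexing a result table (objective: alternative).

-- ===== PORT A =====
def guess_stack (file_summaries : List (List (String × String))) : String :=
  let paths := file_summaries.map
    (fun entry => PySem.Str.lower (PySem.Dict.getD (PySem.Dict.mk entry) "rel_path" ""))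
  if paths.any (fun p => PySem.Str.endswith p "setup.py" || PySem.Str.endswith p "pyproject.toml") then
    "Python package"
  else if paths.any (fun p => PySem.Str.endswith p "package.json") then
    "Node.js project"
  else if paths.any (fun p => PySem.Str.endswith p "dockerfile") then
    "Containerized service"
  else if paths.any (fun p => PySem.Str.endswith p "go.mod") then
    "Go module"
  else if paths.any (fun p => PySem.Str.endswith p "pom.xml") then
    "Java Maven project"
  else
    "Unknown or mixed‐language project"

-- ===== PORT B =====
-- the lowered rel_path of an entry (entry.get("rel_path", "").lower())
def pvPath (entry : List (String × String)) : String :=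
  PySem.Str.lower (PySem.Dict.getD (PySem.Dict.mk entry) "rel_path" "")

-- the _RESULTS table of Source B
def pvResults : List String :=
  ["Python package", "Node.js project", "Containerized service", "Go module",
   "Java Maven project", "Unknown or mixed‐language project"]

-- Source B's _rank: first-match priority rank of a lowered path
def pvRank (p : String) : Nat :=
  if PySem.Str.endswith p "setup.py" || PySem.Str.endswith p "pyproject.toml" then 0
  else if PySem.Str.endswith p "package.json" then 1
  else if PySem.Str.endswith p "dockerfile" then 2
  else if PySem.Str.endswith p "go.mod" then 3
  else if PySem.Str.endswith p "pom.xml" then 4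
  else 5

def guess_stack_alt (file_summaries : List (List (String × String))) : String :=
  let best := file_summaries.foldl
    (fun best entry =>
      let r := pvRank (pvPath entry)
      if r < best then r else best)
    5
  pvResults.getD best ""

-- ===== PRECONDITION & SPEC =====
def Spec_guess_stack (file_summaries : List (List (String × String))) (out : String) : Prop := out = guess_stack_alt file_summaries
instance (file_summaries : List (List (String × String))) (out : String) : Decidable (Spec_guess_stack file_summaries out) := by unfold Spec_guess_stack; infer_instance

-- ===== CLAIM (what is proved, stated in full; the proofs are below) =====
def Claim_equal_guess_stack : Prop := ∀ (file_summaries : List (List (String × String))), Dom_guess_stack file_summaries → Spec_guess_stack file_summaries (guess_stack file_summaries)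

-- ===== LEMMAS AND PROOFS =====

-- characterisation of B's fold: the result is ≤ k iff the seed is or some entry's rank is
lemma pvFold_le (fs : List (List (String × String))) (b0 k : Nat) :
    fs.foldl (fun best entry => let r := pvRank (pvPath entry); if r < best then r else best) b0 ≤ k
      ↔ b0 ≤ k ∨ ∃ e ∈ fs, pvRank (pvPath e) ≤ k := by
  induction fs generalizing b0 with
  | nil => simp
  | cons e t ih =>
    simp only [List.foldl_cons, ih, List.mem_cons]
    constructor
    · rintro (h | h)
      · split_ifs at h with hc
        · exact Or.inr ⟨e, Or.inl rfl, h⟩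
        · exact Or.inl h
      · obtain ⟨x, hx, hr⟩ := h
        exact Or.inr ⟨x, Or.inr hx, hr⟩
    · rintro (h | ⟨x, (rfl | hx), hr⟩)
      · exact Or.inl (by split_ifs with hc <;> omega)
      · exact Or.inl (by split_ifs with hc <;> omega)
      · exact Or.inr ⟨x, hx, hr⟩

lemma pvRank_le0 (p : String) :
    pvRank p ≤ 0 ↔ (PySem.Str.endswith p "setup.py" || PySem.Str.endswith p "pyproject.toml") = true := by
  unfold pvRank; split_ifs <;> simp_all

lemma pvRank_le1 (p : String) :
    pvRank p ≤ 1 ↔ (PySem.Str.endswith p "setup.py" || PySem.Str.endswith p "pyproject.toml"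
      || PySem.Str.endswith p "package.json") = true := by
  unfold pvRank; split_ifs <;> simp_all

lemma pvRank_le2 (p : String) :
    pvRank p ≤ 2 ↔ (PySem.Str.endswith p "setup.py" || PySem.Str.endswith p "pyproject.toml"
      || PySem.Str.endswith p "package.json" || PySem.Str.endswith p "dockerfile") = true := by
  unfold pvRank; split_ifs <;> simp_all

lemma pvRank_le3 (p : String) :
    pvRank p ≤ 3 ↔ (PySem.Str.endswith p "setup.py" || PySem.Str.endswith p "pyproject.toml"
      || PySem.Str.endswith p "package.json" || PySem.Str.endswith p "dockerfile"
      || PySem.Str.endswith p "go.mod") = true := by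
  unfold pvRank; split_ifs <;> simp_all

lemma pvRank_le4 (p : String) :
    pvRank p ≤ 4 ↔ (PySem.Str.endswith p "setup.py" || PySem.Str.endswith p "pyproject.toml"
      || PySem.Str.endswith p "package.json" || PySem.Str.endswith p "dockerfile"
      || PySem.Str.endswith p "go.mod" || PySem.Str.endswith p "pom.xml") = true := by
  unfold pvRank; split_ifs <;> simp_all

-- ===== VERDICT (by name: the statement is the Claim_ definition above) =====
set_option maxHeartbeats 1000000 in
theorem guess_stack_spec : Claim_equal_guess_stack := by
  intro fs _
  show guess_stack fs = guess_stack_alt fs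
  unfold guess_stack guess_stack_alt
  simp only [List.any_map, List.any_eq_true, Function.comp]
  have hfold := pvFold_le fs 5
  set best := fs.foldl (fun best entry => let r := pvRank (pvPath entry); if r < best then r else best) 5 with hbest
  by_cases h0 : ∃ e ∈ fs, (PySem.Str.endswith (pvPath e) "setup.py" || PySem.Str.endswith (pvPath e) "pyproject.toml") = true
  · have : best = 0 := by
      have := (hfold 0).mpr (Or.inr (by
        obtain ⟨e, he, hm⟩ := h0
        exact ⟨e, he, (pvRank_le0 _).mpr hm⟩))
      omega
    simp only [this, pvResults]
    rw [if_pos (by obtain ⟨e, he, hm⟩ := h0; exact ⟨e, he, hm⟩)]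
    rfl
  · rw [if_neg (by simpa [pvPath] using h0)]
    by_cases h1 : ∃ e ∈ fs, PySem.Str.endswith (pvPath e) "package.json" = true
    · have hle : best ≤ 1 := (hfold 1).mpr (Or.inr (by
        obtain ⟨e, he, hm⟩ := h1
        exact ⟨e, he, (pvRank_le1 _).mpr (Bool.or_eq_true_iff.mpr (Or.inr hm))⟩))
      have hgt : ¬ best ≤ 0 := by
        rw [hfold 0]
        rintro (h | ⟨e, he, hr⟩)
        · omega
        · exact h0 ⟨e, he, (pvRank_le0 _).mp hr⟩
      have : best = 1 := by omega
      simp only [this, pvResults]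
      rw [if_pos (by obtain ⟨e, he, hm⟩ := h1; exact ⟨e, he, hm⟩)]
      rfl
    · rw [if_neg (by simpa [pvPath] using h1)]
      by_cases h2 : ∃ e ∈ fs, PySem.Str.endswith (pvPath e) "dockerfile" = true
      · have hle : best ≤ 2 := (hfold 2).mpr (Or.inr (by
          obtain ⟨e, he, hm⟩ := h2
          exact ⟨e, he, (pvRank_le2 _).mpr (Bool.or_eq_true_iff.mpr (Or.inr hm))⟩))
        have hgt : ¬ best ≤ 1 := by
          rw [hfold 1]
          rintro (h | ⟨e, he, hr⟩)
          · omega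
          · rcases Bool.or_eq_true_iff.mp ((pvRank_le1 _).mp hr) with h' | h'
            · exact h0 ⟨e, he, h'⟩
            · exact h1 ⟨e, he, h'⟩
        have : best = 2 := by omega
        simp only [this, pvResults]
        rw [if_pos (by obtain ⟨e, he, hm⟩ := h2; exact ⟨e, he, hm⟩)]
        rfl
      · rw [if_neg (by simpa [pvPath] using h2)]
        by_cases h3 : ∃ e ∈ fs, PySem.Str.endswith (pvPath e) "go.mod" = true
        · have hle : best ≤ 3 := (hfold 3).mpr (Or.inr (by
            obtain ⟨e, he, hm⟩ := h3
            exact ⟨e, he, (pvRank_le3 _).mpr (Bool.or_eq_true_iff.mpr (Or.inr hm))⟩))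
          have hgt : ¬ best ≤ 2 := by
            rw [hfold 2]
            rintro (h | ⟨e, he, hr⟩)
            · omega
            · rcases Bool.or_eq_true_iff.mp ((pvRank_le2 _).mp hr) with h' | h'
              · rcases Bool.or_eq_true_iff.mp h' with h'' | h''
                · exact h0 ⟨e, he, h''⟩
                · exact h1 ⟨e, he, h''⟩
              · exact h2 ⟨e, he, h'⟩
          have : best = 3 := by omega
          simp only [this, pvResults]
          rw [if_pos (by obtain ⟨e, he, hm⟩ := h3; exact ⟨e, he, hm⟩)]
          rfl
        · rw [if_neg (by simpa [pvPath] using h3)]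
          by_cases h4 : ∃ e ∈ fs, PySem.Str.endswith (pvPath e) "pom.xml" = true
          · have hle : best ≤ 4 := (hfold 4).mpr (Or.inr (by
              obtain ⟨e, he, hm⟩ := h4
              exact ⟨e, he, (pvRank_le4 _).mpr (Bool.or_eq_true_iff.mpr (Or.inr hm))⟩))
            have hgt : ¬ best ≤ 3 := by
              rw [hfold 3]
              rintro (h | ⟨e, he, hr⟩)
              · omega
              · rcases Bool.or_eq_true_iff.mp ((pvRank_le3 _).mp hr) with h' | h'
                · rcases Bool.or_eq_true_iff.mp h' with h'' | h''
                  · rcases Bool.or_eq_true_iff.mp h'' with h3' | h3'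
                    · exact h0 ⟨e, he, h3'⟩
                    · exact h1 ⟨e, he, h3'⟩
                  · exact h2 ⟨e, he, h''⟩
                · exact h3 ⟨e, he, h'⟩
            have : best = 4 := by omega
            simp only [this, pvResults]
            rw [if_pos (by obtain ⟨e, he, hm⟩ := h4; exact ⟨e, he, hm⟩)]
            rfl
          · rw [if_neg (by simpa [pvPath] using h4)]
            have hgt : ¬ best ≤ 4 := by
              rw [hfold 4]
              rintro (h | ⟨e, he, hr⟩)
              · omega
              · rcases Bool.or_eq_true_iff.mp ((pvRank_le4 _).mp hr) with h' | h'
                · rcases Bool.or_eq_true_iff.mp h' with h'' | h''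
                  · rcases Bool.or_eq_true_iff.mp h'' with h3' | h3'
                    · rcases Bool.or_eq_true_iff.mp h3' with h4' | h4'
                      · exact h0 ⟨e, he, h4'⟩
                      · exact h1 ⟨e, he, h4'⟩
                    · exact h2 ⟨e, he, h3'⟩
                  · exact h3 ⟨e, he, h''⟩
                · exact h4 ⟨e, he, h'⟩
            have hle : best ≤ 5 := (hfold 5).mpr (Or.inl (by omega))
            have : best = 5 := by omega
            simp only [this, pvResults]
            rfl
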